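-- pv_equiv track=rewrite | github.com/vedantgaur/rabbit-hole | backend/app.py | is_music_query
-- ===== SOURCE A (Python) =====
-- def is_music_query(query):
--     music_keywords = [
--         'music', 'song', 'melody', 'rhythm', 'harmony', 'composer', 'singer', 'musician',
--         'band', 'orchestra', 'symphony', 'concert', 'opera', 'jazz', 'blues', 'rock',
--         'pop', 'hip hop', 'rap', 'classical', 'baroque', 'romantic', 'contemporary',
--         'electronic', 'dance', 'techno', 'house', 'ambient', 'folk', 'country',
--         'reggae', 'ska', 'punk', 'metal', 'alternative', 'indie', 'r&b', 'soul',
--         'funk', 'disco', 'gospel', 'choral', 'acapella', 'instrumental', 'vocal',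
--         'lyrics', 'chord', 'scale', 'key', 'tempo', 'time signature', 'pitch',
--         'timbre', 'tone', 'note', 'staff', 'clef', 'octave', 'interval', 'triad',
--         'arpeggio', 'progression', 'cadence', 'modulation', 'transposition',
--         'counterpoint', 'fugue', 'sonata', 'concerto', 'suite', 'etude', 'nocturne',
--         'prelude', 'overture', 'aria', 'recitative', 'libretto', 'score', 'arrangement',
--         'orchestration', 'instrumentation', 'ensemble', 'quartet', 'quintet', 'sextet',
--         'conductor', 'virtuoso', 'improvisation', 'jam', 'gig', 'tour', 'album',
--         'single', 'EP', 'remix', 'cover', 'sample', 'loop', 'beat', 'bassline',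
--         'riff', 'hook', 'verse', 'chorus', 'bridge', 'coda', 'intro', 'outro',
--         'crescendo', 'diminuendo', 'forte', 'piano', 'staccato', 'legato', 'vibrato',
--         'tremolo', 'glissando', 'portamento', 'syncopation', 'polyrhythm', 'ostinato',
--         'leitmotif', 'tone row', 'atonality', 'microtonality', 'serialism', 'minimalism'
--     ]
--     return any(keyword in query.lower() for keyword in music_keywords)
-- ===== SOURCE B (Python) =====
-- def is_music_query(query):
--     music_keywords = [
--         'music', 'song', 'melody', 'rhythm', 'harmony', 'composer', 'singer', 'musician', 'band',
--         'orchestra', 'symphony', 'concert', 'opera', 'jazz', 'blues', 'rock', 'pop', 'hip hop',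
--         'rap', 'classical', 'baroque', 'romantic', 'contemporary', 'electronic', 'dance',
--         'techno', 'house', 'ambient', 'folk', 'country', 'reggae', 'ska', 'punk', 'metal',
--         'alternative', 'indie', 'r&b', 'soul', 'funk', 'disco', 'gospel', 'choral', 'acapella',
--         'instrumental', 'vocal', 'lyrics', 'chord', 'scale', 'key', 'tempo', 'time signature',
--         'pitch', 'timbre', 'tone', 'note', 'staff', 'clef', 'octave', 'interval', 'triad',
--         'arpeggio', 'progression', 'cadence', 'modulation', 'transposition', 'counterpoint',
--         'fugue', 'sonata', 'concerto', 'suite', 'etude', 'nocturne', 'prelude', 'overture',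
--         'aria', 'recitative', 'libretto', 'score', 'arrangement', 'orchestration',
--         'instrumentation', 'ensemble', 'quartet', 'quintet', 'sextet', 'conductor', 'virtuoso',
--         'improvisation', 'jam', 'gig', 'tour', 'album', 'single', 'EP', 'remix', 'cover',
--         'sample', 'loop', 'beat', 'bassline', 'riff', 'hook', 'verse', 'chorus', 'bridge', 'coda',
--         'intro', 'outro', 'crescendo', 'diminuendo', 'forte', 'piano', 'staccato', 'legato',
--         'vibrato', 'tremolo', 'glissando', 'portamento', 'syncopation', 'polyrhythm', 'ostinato',
--         'leitmotif', 'tone row', 'atonality', 'microtonality', 'serialism', 'minimalism'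
--     ]
--     # Position-major scan: index the keywords once by their first character, then
--     # walk the lowered query left to right, testing only the keywords whose first
--     # character matches the current one.
--     buckets = {}
--     for k in music_keywords:
--         buckets.setdefault(k[0], []).append(k)
--     q = query.lower()
--     for i in range(len(q)):
--         for k in buckets.get(q[i], ()):
--             if q.startswith(k, i):
--                 return True
--     return False
-- ===== Notes on version B (the rewrite author's own statement) =====
-- stated objective: alternative
-- what changed: Replaces the keyword-major scan (one separate substring search of the lowered query per keyword) by a position-major algorithm: the keywords are indexed once in a dict by first character, then the lowered query is walked left to right, testing only the keywords whose first character matches the current position.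
import Mathlib
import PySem

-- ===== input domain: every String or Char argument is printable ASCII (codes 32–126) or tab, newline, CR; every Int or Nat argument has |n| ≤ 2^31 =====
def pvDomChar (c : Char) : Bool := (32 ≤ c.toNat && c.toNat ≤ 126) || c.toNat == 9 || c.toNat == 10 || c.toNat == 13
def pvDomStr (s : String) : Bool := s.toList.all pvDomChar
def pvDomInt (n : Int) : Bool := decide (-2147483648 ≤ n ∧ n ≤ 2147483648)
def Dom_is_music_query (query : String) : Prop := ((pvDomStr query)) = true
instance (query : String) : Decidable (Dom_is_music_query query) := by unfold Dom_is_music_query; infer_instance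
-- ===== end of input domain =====

-- B replaces the keyword-major 'any(keyword in query.lower() ...)' scan (one substring search
-- per keyword) by a position-major left-to-right scan of the lowered query, testing only the
-- keywords bucketed (once, in a dict) by their first character (objective: alternative).

-- ===== PORT A =====
def musicKeywordsA : List String := [
    "music", "song", "melody", "rhythm", "harmony", "composer", "singer", "musician",
    "band", "orchestra", "symphony", "concert", "opera", "jazz", "blues", "rock",
    "pop", "hip hop", "rap", "classical", "baroque", "romantic", "contemporary",
    "electronic", "dance", "techno", "house", "ambient", "folk", "country",
    "reggae", "ska", "punk", "metal", "alternative", "indie", "r&b", "soul",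
    "funk", "disco", "gospel", "choral", "acapella", "instrumental", "vocal",
    "lyrics", "chord", "scale", "key", "tempo", "time signature", "pitch",
    "timbre", "tone", "note", "staff", "clef", "octave", "interval", "triad",
    "arpeggio", "progression", "cadence", "modulation", "transposition",
    "counterpoint", "fugue", "sonata", "concerto", "suite", "etude", "nocturne",
    "prelude", "overture", "aria", "recitative", "libretto", "score", "arrangement",
    "orchestration", "instrumentation", "ensemble", "quartet", "quintet", "sextet",
    "conductor", "virtuoso", "improvisation", "jam", "gig", "tour", "album",
    "single", "EP", "remix", "cover", "sample", "loop", "beat", "bassline",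
    "riff", "hook", "verse", "chorus", "bridge", "coda", "intro", "outro",
    "crescendo", "diminuendo", "forte", "piano", "staccato", "legato", "vibrato",
    "tremolo", "glissando", "portamento", "syncopation", "polyrhythm", "ostinato",
    "leitmotif", "tone row", "atonality", "microtonality", "serialism", "minimalism"]

def is_music_query (query : String) : Bool :=
  musicKeywordsA.any (fun keyword => PySem.Str.isIn keyword (PySem.Str.lower query))

-- ===== PORT B =====
-- Source B's keyword string constants are represented as their character lists (exact: B's scan
-- only ever compares the keywords character by character against the lowered query).
def musicKeywordsB : List (List Char) := [
  ['m', 'u', 's', 'i', 'c'],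
  ['s', 'o', 'n', 'g'],
  ['m', 'e', 'l', 'o', 'd', 'y'],
  ['r', 'h', 'y', 't', 'h', 'm'],
  ['h', 'a', 'r', 'm', 'o', 'n', 'y'],
  ['c', 'o', 'm', 'p', 'o', 's', 'e', 'r'],
  ['s', 'i', 'n', 'g', 'e', 'r'],
  ['m', 'u', 's', 'i', 'c', 'i', 'a', 'n'],
  ['b', 'a', 'n', 'd'],
  ['o', 'r', 'c', 'h', 'e', 's', 't', 'r', 'a'],
  ['s', 'y', 'm', 'p', 'h', 'o', 'n', 'y'],
  ['c', 'o', 'n', 'c', 'e', 'r', 't'],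
  ['o', 'p', 'e', 'r', 'a'],
  ['j', 'a', 'z', 'z'],
  ['b', 'l', 'u', 'e', 's'],
  ['r', 'o', 'c', 'k'],
  ['p', 'o', 'p'],
  ['h', 'i', 'p', ' ', 'h', 'o', 'p'],
  ['r', 'a', 'p'],
  ['c', 'l', 'a', 's', 's', 'i', 'c', 'a', 'l'],
  ['b', 'a', 'r', 'o', 'q', 'u', 'e'],
  ['r', 'o', 'm', 'a', 'n', 't', 'i', 'c'],
  ['c', 'o', 'n', 't', 'e', 'm', 'p', 'o', 'r', 'a', 'r', 'y'],
  ['e', 'l', 'e', 'c', 't', 'r', 'o', 'n', 'i', 'c'],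
  ['d', 'a', 'n', 'c', 'e'],
  ['t', 'e', 'c', 'h', 'n', 'o'],
  ['h', 'o', 'u', 's', 'e'],
  ['a', 'm', 'b', 'i', 'e', 'n', 't'],
  ['f', 'o', 'l', 'k'],
  ['c', 'o', 'u', 'n', 't', 'r', 'y'],
  ['r', 'e', 'g', 'g', 'a', 'e'],
  ['s', 'k', 'a'],
  ['p', 'u', 'n', 'k'],
  ['m', 'e', 't', 'a', 'l'],
  ['a', 'l', 't', 'e', 'r', 'n', 'a', 't', 'i', 'v', 'e'],
  ['i', 'n', 'd', 'i', 'e'],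
  ['r', '&', 'b'],
  ['s', 'o', 'u', 'l'],
  ['f', 'u', 'n', 'k'],
  ['d', 'i', 's', 'c', 'o'],
  ['g', 'o', 's', 'p', 'e', 'l'],
  ['c', 'h', 'o', 'r', 'a', 'l'],
  ['a', 'c', 'a', 'p', 'e', 'l', 'l', 'a'],
  ['i', 'n', 's', 't', 'r', 'u', 'm', 'e', 'n', 't', 'a', 'l'],
  ['v', 'o', 'c', 'a', 'l'],
  ['l', 'y', 'r', 'i', 'c', 's'],
  ['c', 'h', 'o', 'r', 'd'],
  ['s', 'c', 'a', 'l', 'e'],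
  ['k', 'e', 'y'],
  ['t', 'e', 'm', 'p', 'o'],
  ['t', 'i', 'm', 'e', ' ', 's', 'i', 'g', 'n', 'a', 't', 'u', 'r', 'e'],
  ['p', 'i', 't', 'c', 'h'],
  ['t', 'i', 'm', 'b', 'r', 'e'],
  ['t', 'o', 'n', 'e'],
  ['n', 'o', 't', 'e'],
  ['s', 't', 'a', 'f', 'f'],
  ['c', 'l', 'e', 'f'],
  ['o', 'c', 't', 'a', 'v', 'e'],
  ['i', 'n', 't', 'e', 'r', 'v', 'a', 'l'],
  ['t', 'r', 'i', 'a', 'd'],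
  ['a', 'r', 'p', 'e', 'g', 'g', 'i', 'o'],
  ['p', 'r', 'o', 'g', 'r', 'e', 's', 's', 'i', 'o', 'n'],
  ['c', 'a', 'd', 'e', 'n', 'c', 'e'],
  ['m', 'o', 'd', 'u', 'l', 'a', 't', 'i', 'o', 'n'],
  ['t', 'r', 'a', 'n', 's', 'p', 'o', 's', 'i', 't', 'i', 'o', 'n'],
  ['c', 'o', 'u', 'n', 't', 'e', 'r', 'p', 'o', 'i', 'n', 't'],
  ['f', 'u', 'g', 'u', 'e'],
  ['s', 'o', 'n', 'a', 't', 'a'],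
  ['c', 'o', 'n', 'c', 'e', 'r', 't', 'o'],
  ['s', 'u', 'i', 't', 'e'],
  ['e', 't', 'u', 'd', 'e'],
  ['n', 'o', 'c', 't', 'u', 'r', 'n', 'e'],
  ['p', 'r', 'e', 'l', 'u', 'd', 'e'],
  ['o', 'v', 'e', 'r', 't', 'u', 'r', 'e'],
  ['a', 'r', 'i', 'a'],
  ['r', 'e', 'c', 'i', 't', 'a', 't', 'i', 'v', 'e'],
  ['l', 'i', 'b', 'r', 'e', 't', 't', 'o'],
  ['s', 'c', 'o', 'r', 'e'],
  ['a', 'r', 'r', 'a', 'n', 'g', 'e', 'm', 'e', 'n', 't'],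
  ['o', 'r', 'c', 'h', 'e', 's', 't', 'r', 'a', 't', 'i', 'o', 'n'],
  ['i', 'n', 's', 't', 'r', 'u', 'm', 'e', 'n', 't', 'a', 't', 'i', 'o', 'n'],
  ['e', 'n', 's', 'e', 'm', 'b', 'l', 'e'],
  ['q', 'u', 'a', 'r', 't', 'e', 't'],
  ['q', 'u', 'i', 'n', 't', 'e', 't'],
  ['s', 'e', 'x', 't', 'e', 't'],
  ['c', 'o', 'n', 'd', 'u', 'c', 't', 'o', 'r'],
  ['v', 'i', 'r', 't', 'u', 'o', 's', 'o'],
  ['i', 'm', 'p', 'r', 'o', 'v', 'i', 's', 'a', 't', 'i', 'o', 'n'],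
  ['j', 'a', 'm'],
  ['g', 'i', 'g'],
  ['t', 'o', 'u', 'r'],
  ['a', 'l', 'b', 'u', 'm'],
  ['s', 'i', 'n', 'g', 'l', 'e'],
  ['E', 'P'],
  ['r', 'e', 'm', 'i', 'x'],
  ['c', 'o', 'v', 'e', 'r'],
  ['s', 'a', 'm', 'p', 'l', 'e'],
  ['l', 'o', 'o', 'p'],
  ['b', 'e', 'a', 't'],
  ['b', 'a', 's', 's', 'l', 'i', 'n', 'e'],
  ['r', 'i', 'f', 'f'],
  ['h', 'o', 'o', 'k'],
  ['v', 'e', 'r', 's', 'e'],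
  ['c', 'h', 'o', 'r', 'u', 's'],
  ['b', 'r', 'i', 'd', 'g', 'e'],
  ['c', 'o', 'd', 'a'],
  ['i', 'n', 't', 'r', 'o'],
  ['o', 'u', 't', 'r', 'o'],
  ['c', 'r', 'e', 's', 'c', 'e', 'n', 'd', 'o'],
  ['d', 'i', 'm', 'i', 'n', 'u', 'e', 'n', 'd', 'o'],
  ['f', 'o', 'r', 't', 'e'],
  ['p', 'i', 'a', 'n', 'o'],
  ['s', 't', 'a', 'c', 'c', 'a', 't', 'o'],
  ['l', 'e', 'g', 'a', 't', 'o'],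
  ['v', 'i', 'b', 'r', 'a', 't', 'o'],
  ['t', 'r', 'e', 'm', 'o', 'l', 'o'],
  ['g', 'l', 'i', 's', 's', 'a', 'n', 'd', 'o'],
  ['p', 'o', 'r', 't', 'a', 'm', 'e', 'n', 't', 'o'],
  ['s', 'y', 'n', 'c', 'o', 'p', 'a', 't', 'i', 'o', 'n'],
  ['p', 'o', 'l', 'y', 'r', 'h', 'y', 't', 'h', 'm'],
  ['o', 's', 't', 'i', 'n', 'a', 't', 'o'],
  ['l', 'e', 'i', 't', 'm', 'o', 't', 'i', 'f'],
  ['t', 'o', 'n', 'e', ' ', 'r', 'o', 'w'],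
  ['a', 't', 'o', 'n', 'a', 'l', 'i', 't', 'y'],
  ['m', 'i', 'c', 'r', 'o', 't', 'o', 'n', 'a', 'l', 'i', 't', 'y'],
  ['s', 'e', 'r', 'i', 'a', 'l', 'i', 's', 'm'],
  ['m', 'i', 'n', 'i', 'm', 'a', 'l', 'i', 's', 'm']]

-- buckets = {}; for k in music_keywords: buckets.setdefault(k[0], []).append(k)
-- (setdefault-then-append is Dict.modify; every keyword is nonempty, so k[0] never raises)
def kwBuckets : PySem.Dict Char (List (List Char)) :=
  musicKeywordsB.foldl (fun d k => d.modify (k.headD ' ') [] (fun l => l ++ [k])) PySem.Dict.empty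

-- for i in range(len(q)): for k in buckets.get(q[i], ()): if q.startswith(k, i): return True / return False
-- (the i-th iteration sees the suffix q[i:]; q.startswith(k, i) is exact as startswith on that suffix)
def kwScan (buckets : PySem.Dict Char (List (List Char))) : List Char → Bool
  | [] => false
  | c :: rest =>
      (buckets.getD c []).any (fun k => PySem.Chars.startswith (c :: rest) k) || kwScan buckets rest

def is_music_query_alt (query : String) : Bool :=
  kwScan kwBuckets (PySem.Str.lower query).toList

-- ===== PRECONDITION & SPEC =====
def Spec_is_music_query (query : String) (out : Bool) : Prop := out = is_music_query_alt query
instance (query : String) (out : Bool) : Decidable (Spec_is_music_query query out) := by unfold Spec_is_music_query; infer_instance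

-- ===== CLAIM (what is proved, stated in full; the proofs are below) =====
def Claim_equal_is_music_query : Prop := ∀ (query : String), Dom_is_music_query query → Spec_is_music_query query (is_music_query query)

-- ===== LEMMAS AND PROOFS =====

-- B's char-list keywords are exactly A's keywords as character lists
set_option maxRecDepth 100000 in
set_option maxHeartbeats 1000000 in
lemma kwB_eq : musicKeywordsB = musicKeywordsA.map String.toList := by decide

-- the bucket dict looks up exactly the keywords whose first character is c, in list order
lemma kwBuckets_getD (c : Char) :
    kwBuckets.getD c [] = (musicKeywordsA.map String.toList).filter (fun k => k.headD ' ' == c) := by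
  have h : kwBuckets =
      ((musicKeywordsA.map String.toList).map (fun k => (k.headD ' ', k))).foldl
        (fun d p => d.modify p.1 [] (fun l => l ++ [p.2])) PySem.Dict.empty := by
    rw [List.foldl_map]
    rw [kwBuckets, kwB_eq]
  rw [h, PySem.Dict.getD_foldl_modify_append]
  simp [List.filter_map, Function.comp_def]

-- every keyword is nonempty
set_option maxRecDepth 100000 in
set_option maxHeartbeats 1000000 in
lemma kw_ne_nil : ∀ k ∈ musicKeywordsA.map String.toList, k ≠ [] := by decide

-- the position-major bucketed scan finds exactly the keywords occurring as substrings
lemma kwScan_eq (L : List Char) :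
    kwScan kwBuckets L = (musicKeywordsA.map String.toList).any (fun k => PySem.Chars.isIn k L) := by
  induction L with
  | nil =>
    rw [kwScan]
    rw [List.any_eq_false.mpr]
    intro k hk
    simp [PySem.Chars.isIn_iff_infix, List.infix_nil, kw_ne_nil k hk]
  | cons c rest ih =>
    rw [kwScan, ih, kwBuckets_getD]
    refine Bool.eq_iff_iff.mpr ?_
    simp only [Bool.or_eq_true, List.any_eq_true, List.mem_filter,
      PySem.Chars.isIn_iff_infix, PySem.Chars.startswith_iff, List.infix_cons_iff, beq_iff_eq]
    constructor
    · rintro (⟨k, ⟨hk, _⟩, hp⟩ | ⟨k, hk, hi⟩)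
      · exact ⟨k, hk, Or.inl hp⟩
      · exact ⟨k, hk, Or.inr hi⟩
    · rintro ⟨k, hk, hp | hi⟩
      · refine Or.inl ⟨k, ⟨hk, ?_⟩, hp⟩
        obtain ⟨a, t, he⟩ : ∃ a t, k = a :: t := by
          cases k with
          | nil => exact absurd rfl (kw_ne_nil [] hk)
          | cons a t => exact ⟨a, t, rfl⟩
        rw [he] at hp ⊢
        rw [List.headD_cons, (List.cons_prefix_cons.mp hp).1]
      · exact Or.inr ⟨k, hk, hi⟩

theorem is_music_query_eq_alt (query : String) : is_music_query query = is_music_query_alt query := by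
  rw [is_music_query, is_music_query_alt, kwScan_eq, List.any_map]
  simp only [PySem.Str.isIn_eq]
  rfl

-- ===== VERDICT (by name: the statement is the Claim_ definition above) =====
theorem is_music_query_spec : Claim_equal_is_music_query := by
  intro query _
  unfold Spec_is_music_query
  exact is_music_query_eq_alt query
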